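-- pv_equiv track=rewrite | github.com/iamarya/datastructures-algorithms | archive/datastructures_algorithms/strings/mixed_problems/anagram_difference.py | getMinimumAnagramDifference
-- ===== SOURCE A (Python) =====
-- def getMinimumAnagramDifference(str1, str2):
--     count = 0
--     for c in str1:
--         if c in str2:
--             str2 = str2.replace(c, "", 1)
--         else:
--             count += 1
--     return count
-- ===== SOURCE B (Python) =====
-- def getMinimumAnagramDifference(str1, str2):
--     s1 = sorted(str1)
--     s2 = sorted(str2)
--     i = j = 0
--     count = 0
--     while i < len(s1) and j < len(s2):
--         if s1[i] == s2[j]: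
--             i += 1
--             j += 1
--         elif s1[i] < s2[j]:
--             count += 1
--             i += 1
--         else:
--             j += 1
--     return count + len(s1) - i
-- ===== Notes on version B (the rewrite author's own statement) =====
-- stated objective: faster
-- what changed: B sorts both strings and counts unmatched str1 chars with a single two-pointer merge pass, instead of A's per-character substring scan and str2.replace rebuild.
import Mathlib
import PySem

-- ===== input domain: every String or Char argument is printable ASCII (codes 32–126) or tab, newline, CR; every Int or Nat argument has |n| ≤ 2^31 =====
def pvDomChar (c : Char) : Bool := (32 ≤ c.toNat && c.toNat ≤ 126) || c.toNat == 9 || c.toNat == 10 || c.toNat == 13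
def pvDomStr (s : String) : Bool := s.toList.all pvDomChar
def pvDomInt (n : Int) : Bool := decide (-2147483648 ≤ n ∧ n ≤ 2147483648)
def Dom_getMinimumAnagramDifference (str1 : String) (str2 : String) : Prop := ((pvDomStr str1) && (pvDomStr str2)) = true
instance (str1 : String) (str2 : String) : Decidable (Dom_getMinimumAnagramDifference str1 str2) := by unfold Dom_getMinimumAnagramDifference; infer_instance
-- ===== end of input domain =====

-- B sorts both strings and counts unmatched str1 chars in one two-pointer merge pass,
-- replacing A's per-character substring scan + str2.replace rebuild (objective: faster).

-- ===== PORT A =====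
-- A iterates over the chars of str1 keeping the shrinking str2 as state.
-- 'c in str2' is membership in str2's char list, and under that guard
-- str2.replace(c, "", 1) removes exactly the first occurrence of c = List.erase; both exact.
def getMinimumAnagramDifference (str1 : String) (str2 : String) : Int :=
  (str1.toList.foldl
    (fun (st : List Char × Int) c =>
      if c ∈ st.1 then (st.1.erase c, st.2) else (st.1, st.2 + 1))
    (str2.toList, 0)).2

-- ===== PORT B =====
-- the while loop of Source B, step for step: indices i, j, accumulator count;
-- after the loop it returns count + len(s1) - i.
def pvBLoop (s1 s2 : List Char) (i j : Nat) (count : Int) : Int :=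
  if h : i < s1.length ∧ j < s2.length then
    if s1[i]'h.1 = s2[j]'h.2 then pvBLoop s1 s2 (i + 1) (j + 1) count
    else if s1[i]'h.1 < s2[j]'h.2 then pvBLoop s1 s2 (i + 1) j (count + 1)
    else pvBLoop s1 s2 i (j + 1) count
  else count + ((s1.length : Int) - (i : Int))
termination_by (s1.length - i) + (s2.length - j)
decreasing_by all_goals omega

-- sorted(str1) / sorted(str2) = PySem.List.sorted with the identity key (exact).
def getMinimumAnagramDifference_alt (str1 : String) (str2 : String) : Int :=
  let s1 := PySem.List.sorted str1.toList (fun c => c) false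
  let s2 := PySem.List.sorted str2.toList (fun c => c) false
  pvBLoop s1 s2 0 0 0

-- ===== PRECONDITION & SPEC =====
def Spec_getMinimumAnagramDifference (str1 : String) (str2 : String) (out : Int) : Prop := out = getMinimumAnagramDifference_alt str1 str2
instance (str1 : String) (str2 : String) (out : Int) : Decidable (Spec_getMinimumAnagramDifference str1 str2 out) := by unfold Spec_getMinimumAnagramDifference; infer_instance

-- ===== CLAIM (what is proved, stated in full; the proofs are below) =====
def Claim_equal_getMinimumAnagramDifference : Prop := ∀ (str1 : String) (str2 : String), Dom_getMinimumAnagramDifference str1 str2 → Spec_getMinimumAnagramDifference str1 str2 (getMinimumAnagramDifference str1 str2)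

-- ===== LEMMAS AND PROOFS =====

-- the greedy multiset-difference count A computes, as a clean recursion
def pvG : List Char → List Char → Int
  | [], _ => 0
  | c :: l1, l2 => if c ∈ l2 then pvG l1 (l2.erase c) else 1 + pvG l1 l2

lemma pvFoldl_eq_pvG (l1 : List Char) : ∀ (l2 : List Char) (k : Int),
    (l1.foldl
      (fun (st : List Char × Int) c =>
        if c ∈ st.1 then (st.1.erase c, st.2) else (st.1, st.2 + 1))
      (l2, k)).2 = k + pvG l1 l2 := by
  induction l1 with
  | nil => intro l2 k; simp [pvG]
  | cons c l1 ih =>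
    intro l2 k
    by_cases hc : c ∈ l2
    · simp only [List.foldl_cons, if_pos hc, pvG, ih]
    · simp only [List.foldl_cons, if_neg hc, pvG, ih]; ring

lemma pvG_nil_right (l1 : List Char) : pvG l1 [] = (l1.length : Int) := by
  induction l1 with
  | nil => simp [pvG]
  | cons c l1 ih => simp [pvG, ih]; ring

lemma pvG_drop (b : Char) (l1 : List Char) : ∀ l2, b ∉ l1 → pvG l1 (b :: l2) = pvG l1 l2 := by
  induction l1 with
  | nil => intro l2 _; rfl
  | cons c l1 ih =>
    intro l2 hb
    have hcb : c ≠ b := fun h => hb (h ▸ List.mem_cons_self ..)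
    have hbl1 : b ∉ l1 := fun h => hb (List.mem_cons_of_mem _ h)
    have hmem : c ∈ b :: l2 ↔ c ∈ l2 := by simp [List.mem_cons, hcb]
    by_cases hc : c ∈ l2
    · rw [pvG, if_pos (hmem.mpr hc), pvG, if_pos hc,
        List.erase_cons_tail (by simp [Ne.symm hcb] : ¬ (b == c) = true)]
      exact ih _ hbl1
    · rw [pvG, if_neg (fun h => hc (hmem.mp h)), pvG, if_neg hc, ih _ hbl1]

lemma pvG_permR (l1 : List Char) : ∀ {l2 l2' : List Char}, l2.Perm l2' → pvG l1 l2 = pvG l1 l2' := by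
  induction l1 with
  | nil => intro l2 l2' _; rfl
  | cons c l1 ih =>
    intro l2 l2' hp
    by_cases hc : c ∈ l2
    · rw [pvG, if_pos hc, pvG, if_pos (hp.mem_iff.mp hc), ih (hp.erase c)]
    · rw [pvG, if_neg hc, pvG, if_neg (fun h => hc (hp.mem_iff.mpr h)), ih hp]

lemma pvG_swap (a b : Char) (l : List Char) (l2 : List Char) :
    pvG (a :: b :: l) l2 = pvG (b :: a :: l) l2 := by
  by_cases ha : a ∈ l2
  · by_cases hb : b ∈ l2.erase a
    · have hb2 : b ∈ l2 := List.mem_of_mem_erase hb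
      have ha2 : a ∈ l2.erase b := by
        by_cases hab : a = b
        · subst hab; exact hb
        · exact (List.mem_erase_of_ne hab).mpr ha
      simp only [pvG, if_pos ha, if_pos hb, if_pos hb2, if_pos ha2]
      exact pvG_permR l (by rw [List.erase_comm])
    · by_cases hb2 : b ∈ l2
      · -- then b = a and a occurs exactly once
        have hab : b = a := by
          by_contra hne
          exact hb ((List.mem_erase_of_ne hne).mpr hb2)
        subst hab
        simp only [pvG, if_pos ha, if_neg hb]
      · have hb' : b ∉ l2.erase a := hb
        have ha' : a ∈ l2 := ha
        simp only [pvG, if_pos ha, if_neg hb, if_neg hb2]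
  · by_cases hb : b ∈ l2
    · have ha' : a ∉ l2.erase b := fun h => ha (List.mem_of_mem_erase h)
      simp only [pvG, if_neg ha, if_pos hb, if_neg ha']
    · simp only [pvG, if_neg ha, if_neg hb]

lemma pvG_permL {l1 l1' : List Char} (hp : l1.Perm l1') : ∀ l2, pvG l1 l2 = pvG l1' l2 := by
  induction hp with
  | nil => intro l2; rfl
  | cons c _ ih =>
    intro l2
    by_cases hc : c ∈ l2
    · rw [pvG, if_pos hc, pvG, if_pos hc, ih]
    · rw [pvG, if_neg hc, pvG, if_neg hc, ih]
  | swap a b l => intro l2; exact pvG_swap b a l l2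
  | trans _ _ ih1 ih2 => intro l2; rw [ih1, ih2]

lemma pvBLoop_eq (s1 s2 : List Char)
    (hs1 : s1.Pairwise (· ≤ ·)) (hs2 : s2.Pairwise (· ≤ ·)) :
    ∀ (n i j : Nat) (c : Int), (s1.length - i) + (s2.length - j) ≤ n →
      i ≤ s1.length → j ≤ s2.length →
      pvBLoop s1 s2 i j c = c + pvG (s1.drop i) (s2.drop j) := by
  intro n
  induction n with
  | zero =>
    intro i j c hn hi hj
    have hi' : i = s1.length := by omega
    rw [pvBLoop]
    rw [dif_neg (by omega)]
    subst hi'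
    simp [pvG]
  | succ n ih =>
    intro i j c hn hi hj
    rw [pvBLoop]
    by_cases h : i < s1.length ∧ j < s2.length
    · rw [dif_pos h]
      have hd1 : s1.drop i = s1[i]'h.1 :: s1.drop (i + 1) := (List.getElem_cons_drop h.1).symm
      have hd2 : s2.drop j = s2[j]'h.2 :: s2.drop (j + 1) := (List.getElem_cons_drop h.2).symm
      have hp1 : (s1.drop i).Pairwise (· ≤ ·) := hs1.sublist (List.drop_sublist i s1)
      have hp2 : (s2.drop j).Pairwise (· ≤ ·) := hs2.sublist (List.drop_sublist j s2)
      by_cases heq : s1[i]'h.1 = s2[j]'h.2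
      · rw [if_pos heq, ih (i + 1) (j + 1) c (by omega) (by omega) (by omega)]
        rw [hd1, hd2, heq, pvG, if_pos (List.mem_cons_self ..), List.erase_cons_head]
      · rw [if_neg heq]
        by_cases hlt : s1[i]'h.1 < s2[j]'h.2
        · rw [if_pos hlt, ih (i + 1) j (c + 1) (by omega) (by omega) hj]
          have hnot : s1[i]'h.1 ∉ s2.drop j := by
            rw [hd2]
            intro hm
            rcases List.mem_cons.mp hm with hh | ht
            · exact heq hh
            · have : s2[j]'h.2 ≤ s1[i]'h.1 := by
                rw [hd2] at hp2
                exact (List.pairwise_cons.mp hp2).1 _ ht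
              exact absurd hlt (not_lt.mpr this)
          rw [hd1, pvG, if_neg hnot]
          ring
        · rw [if_neg hlt, ih i (j + 1) c (by omega) hi (by omega)]
          have hba : s2[j]'h.2 < s1[i]'h.1 := lt_of_le_of_ne (not_lt.mp hlt) (Ne.symm heq)
          have hnot : s2[j]'h.2 ∉ s1.drop i := by
            rw [hd1]
            intro hm
            rcases List.mem_cons.mp hm with hh | ht
            · exact absurd (hh ▸ hba) (lt_irrefl _)
            · have : s1[i]'h.1 ≤ s2[j]'h.2 := by
                rw [hd1] at hp1
                exact (List.pairwise_cons.mp hp1).1 _ ht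
              exact absurd hba (not_lt.mpr this)
          rw [hd2, pvG_drop _ _ _ hnot]
    · rw [dif_neg h]
      rcases not_and_or.mp h with hi' | hj'
      · have : i = s1.length := by omega
        subst this
        simp [pvG]
      · have : j = s2.length := by omega
        subst this
        rw [List.drop_length, pvG_nil_right, List.length_drop]
        omega

-- ===== VERDICT (by name: the statement is the Claim_ definition above) =====
theorem getMinimumAnagramDifference_spec : Claim_equal_getMinimumAnagramDifference := by
  intro str1 str2 _
  unfold Spec_getMinimumAnagramDifference getMinimumAnagramDifference getMinimumAnagramDifference_alt
  rw [pvFoldl_eq_pvG]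
  rw [pvBLoop_eq _ _ (PySem.List.sorted_pairwise str1.toList (fun c => c))
    (PySem.List.sorted_pairwise str2.toList (fun c => c))
    ((PySem.List.sorted str1.toList (fun c => c) false).length
      + (PySem.List.sorted str2.toList (fun c => c) false).length) 0 0 0
    (by omega) (by omega) (by omega)]
  simp only [List.drop_zero]
  rw [pvG_permL (PySem.List.sorted_perm str1.toList (fun c => c) false).symm,
    pvG_permR _ (PySem.List.sorted_perm str2.toList (fun c => c) false).symm]
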